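-- pv_equiv track=rewrite | github.com/gus-maurizio/algo | algo_chars01.py | rotationalCipher
-- ===== SOURCE A (Python) =====
-- def rotationalCipher(input, rotation_factor):
--     from collections import namedtuple
--     import string
--
--     # Write your code here
--     alower = list(string.ascii_lowercase)
--     aupper = list(string.ascii_uppercase)
--     adigit = list(string.digits)
--     # python treats strings as immutable so change in place is not possible, leverage a list of char
--     answer = []
--     for c in input:
--         if c.islower():
--             answer.append(chr(((ord(c)-ord(alower[0]))+rotation_factor)%len(alower)+ord(alower[0])))
--         elif c.isupper():
--             answer.append(chr(((ord(c)-ord(aupper[0]))+rotation_factor)%len(aupper)+ord(aupper[0])))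
--         elif c.isdigit():
--             answer.append(chr(((ord(c)-ord(adigit[0]))+rotation_factor)%len(adigit)+ord(adigit[0])))
--         else:
--             answer.append(c)
--     return ''.join(answer)
-- ===== SOURCE B (Python) =====
-- def rotationalCipher(input, rotation_factor):
--     import string
--     src, dst = "", ""
--     for alphabet in (string.ascii_lowercase, string.ascii_uppercase, string.digits):
--         base, m = ord(alphabet[0]), len(alphabet)
--         src += alphabet
--         dst += "".join(chr((ord(c) - base + rotation_factor) % m + base) for c in alphabet)
--     return input.translate(str.maketrans(src, dst))
-- ===== Notes on version B (the rewrite author's own statement) =====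
-- stated objective: idiomatic
-- what changed: Replaces the per-character if/elif branch arithmetic with a translation table built once via str.maketrans over the three alphabets, then a single input.translate pass (C-level loop, no per-char Python arithmetic).
import Mathlib
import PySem

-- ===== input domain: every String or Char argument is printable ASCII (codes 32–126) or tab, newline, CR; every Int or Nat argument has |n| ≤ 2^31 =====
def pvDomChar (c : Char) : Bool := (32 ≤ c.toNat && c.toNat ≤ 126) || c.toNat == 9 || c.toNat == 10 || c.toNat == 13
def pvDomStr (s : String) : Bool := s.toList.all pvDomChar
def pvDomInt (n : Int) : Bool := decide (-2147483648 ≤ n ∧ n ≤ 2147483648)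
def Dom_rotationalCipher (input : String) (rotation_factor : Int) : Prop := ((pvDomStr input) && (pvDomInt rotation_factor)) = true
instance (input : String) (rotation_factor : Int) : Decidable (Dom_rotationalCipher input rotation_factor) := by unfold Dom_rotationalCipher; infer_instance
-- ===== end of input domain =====

-- B replaces A's per-character if/elif arithmetic by a translation table built once
-- (str.maketrans over the three alphabets) and a single input.translate pass (idiomatic).


-- ===== PORT A =====
def rotationalCipher (input : String) (rotation_factor : Int) : String :=
  let alower := "abcdefghijklmnopqrstuvwxyz".toList
  let aupper := "ABCDEFGHIJKLMNOPQRSTUVWXYZ".toList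
  let adigit := "0123456789".toList
  let answer : List Char := input.toList.foldl (fun answer c =>
    if PySem.Chars.islower c then
      answer ++ [Char.ofNat ((PySem.Int.mod ((c.toNat : Int) - (alower[0]!.toNat : Int) + rotation_factor) (alower.length : Int)).toNat + alower[0]!.toNat)]
    else if PySem.Chars.isupper c then
      answer ++ [Char.ofNat ((PySem.Int.mod ((c.toNat : Int) - (aupper[0]!.toNat : Int) + rotation_factor) (aupper.length : Int)).toNat + aupper[0]!.toNat)]
    else if PySem.Chars.isdigit c then
      answer ++ [Char.ofNat ((PySem.Int.mod ((c.toNat : Int) - (adigit[0]!.toNat : Int) + rotation_factor) (adigit.length : Int)).toNat + adigit[0]!.toNat)]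
    else answer ++ [c]) []
  String.ofList answer

-- ===== PORT B =====
def rotationalCipher_alt (input : String) (rotation_factor : Int) : String :=
  let alphabets : List (List Char) :=
    ["abcdefghijklmnopqrstuvwxyz".toList, "ABCDEFGHIJKLMNOPQRSTUVWXYZ".toList, "0123456789".toList]
  let sd : List Char × List Char := alphabets.foldl (fun sd alphabet =>
      let base : Nat := alphabet[0]!.toNat
      let m := alphabet.length
      (sd.1 ++ alphabet,
       sd.2 ++ alphabet.map (fun c =>
         Char.ofNat ((PySem.Int.mod ((c.toNat : Int) - (base : Int) + rotation_factor) (m : Int)).toNat + base))))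
    ([], [])
  -- str.maketrans(src, dst): the char-to-char table {src[i] ↦ dst[i]} (src has distinct chars here)
  let table : PySem.Dict Char Char := PySem.Dict.mk (sd.1.zip sd.2)
  -- input.translate(table): every char replaced by its table image, chars not in the table unchanged
  String.ofList (input.toList.map (fun c => table.getD c c))

-- ===== PRECONDITION & SPEC =====
def Spec_rotationalCipher (input : String) (rotation_factor : Int) (out : String) : Prop := out = rotationalCipher_alt input rotation_factor
instance (input : String) (rotation_factor : Int) (out : String) : Decidable (Spec_rotationalCipher input rotation_factor out) := by unfold Spec_rotationalCipher; infer_instance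

-- ===== CLAIM (what is proved, stated in full; the proofs are below) =====
def Claim_equal_rotationalCipher : Prop := ∀ (input : String) (rotation_factor : Int), Dom_rotationalCipher input rotation_factor → Spec_rotationalCipher input rotation_factor (rotationalCipher input rotation_factor)

-- ===== LEMMAS AND PROOFS =====

/-- The rotation of one character: `chr((ord c - base + r) % m + base)`. -/
def pvRot (base m : Nat) (r : Int) (c : Char) : Char :=
  Char.ofNat ((PySem.Int.mod ((c.toNat : Int) - (base : Int) + r) (m : Int)).toNat + base)

def pvLowL : List Char := "abcdefghijklmnopqrstuvwxyz".toList
def pvUppL : List Char := "ABCDEFGHIJKLMNOPQRSTUVWXYZ".toList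
def pvDigL : List Char := "0123456789".toList

/-- First-match lookup in a zip-with-image block: hit gives the image, miss falls through. -/
lemma get?_mk_zip_map (ks : List Char) (rest : List (Char × Char)) (f : Char → Char) (c : Char) :
    (PySem.Dict.mk (ks.zip (ks.map f) ++ rest)).get? c =
      if c ∈ ks then some (f c) else (PySem.Dict.mk rest).get? c := by
  induction ks with
  | nil => simp
  | cons k ks ih =>
    simp only [List.map_cons, List.zip_cons_cons, List.cons_append, PySem.Dict.get?_mk_cons]
    by_cases hk : k = c
    · subst hk; simp
    · have hbeq : (k == c) = false := by simp [hk]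
      have hne : ¬ (c = k) := fun h => hk h.symm
      simp [hbeq, ih, List.mem_cons, hne]

lemma char_le_iff (c d : Char) : c ≤ d ↔ c.toNat ≤ d.toNat := by
  rw [Char.le_def]; exact UInt32.le_iff_toNat_le

lemma mem_range_char (c : Char) (L : List Char) (lo hi : Nat)
    (hfwd : L.all (fun k => lo ≤ k.toNat && k.toNat ≤ hi) = true)
    (hbwd : ∀ n, lo ≤ n → n ≤ hi → Char.ofNat n ∈ L) :
    c ∈ L ↔ (lo ≤ c.toNat ∧ c.toNat ≤ hi) := by
  constructor
  · intro h
    have := List.all_eq_true.mp hfwd c h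
    simpa using this
  · intro ⟨h1, h2⟩
    have hc := Char.ofNat_toNat c
    rw [← hc]; exact hbwd _ h1 h2

lemma mem_pvLowL (c : Char) : c ∈ pvLowL ↔ (97 ≤ c.toNat ∧ c.toNat ≤ 122) := by
  refine mem_range_char c pvLowL 97 122 (by decide) ?_
  intro n h1 h2; interval_cases n <;> decide

lemma mem_pvUppL (c : Char) : c ∈ pvUppL ↔ (65 ≤ c.toNat ∧ c.toNat ≤ 90) := by
  refine mem_range_char c pvUppL 65 90 (by decide) ?_
  intro n h1 h2; interval_cases n <;> decide

lemma mem_pvDigL (c : Char) : c ∈ pvDigL ↔ (48 ≤ c.toNat ∧ c.toNat ≤ 57) := by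
  refine mem_range_char c pvDigL 48 57 (by decide) ?_
  intro n h1 h2; interval_cases n <;> decide

lemma islower_iff (c : Char) : PySem.Chars.islower c = true ↔ (97 ≤ c.toNat ∧ c.toNat ≤ 122) := by
  simp only [PySem.Chars.islower, Bool.and_eq_true, decide_eq_true_eq, char_le_iff]
  exact Iff.rfl

lemma isupper_iff (c : Char) : PySem.Chars.isupper c = true ↔ (65 ≤ c.toNat ∧ c.toNat ≤ 90) := by
  simp only [PySem.Chars.isupper, Bool.and_eq_true, decide_eq_true_eq, char_le_iff]
  exact Iff.rfl

lemma isdigit_iff (c : Char) : PySem.Chars.isdigit c = true ↔ (48 ≤ c.toNat ∧ c.toNat ≤ 57) := by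
  simp only [PySem.Chars.isdigit, Bool.and_eq_true, decide_eq_true_eq, char_le_iff]
  exact Iff.rfl

/-- Per character, A's if/elif arithmetic equals B's table lookup. -/
lemma char_step (r : Int) (c : Char) :
    (if PySem.Chars.islower c then pvRot 97 26 r c
     else if PySem.Chars.isupper c then pvRot 65 26 r c
     else if PySem.Chars.isdigit c then pvRot 48 10 r c
     else c)
    = (PySem.Dict.mk ((pvLowL ++ pvUppL ++ pvDigL).zip
        (pvLowL.map (pvRot 97 26 r) ++ pvUppL.map (pvRot 65 26 r) ++ pvDigL.map (pvRot 48 10 r)))).getD c c := by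
  have hz : (pvLowL ++ pvUppL ++ pvDigL).zip
        (pvLowL.map (pvRot 97 26 r) ++ pvUppL.map (pvRot 65 26 r) ++ pvDigL.map (pvRot 48 10 r))
      = pvLowL.zip (pvLowL.map (pvRot 97 26 r)) ++
        (pvUppL.zip (pvUppL.map (pvRot 65 26 r)) ++
         (pvDigL.zip (pvDigL.map (pvRot 48 10 r)) ++ [])) := by
    rw [List.append_assoc pvLowL, List.append_assoc (pvLowL.map _)]
    rw [List.zip_append (by simp), List.zip_append (by simp)]
    simp
  rw [PySem.Dict.getD_eq_get?_getD, hz, get?_mk_zip_map, get?_mk_zip_map, get?_mk_zip_map]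
  by_cases h1 : c ∈ pvLowL
  · have := (mem_pvLowL c).mp h1
    simp [h1, (islower_iff c).mpr this]
  · have hl : PySem.Chars.islower c = false := by
      rw [← Bool.not_eq_true]; rw [islower_iff]; rw [mem_pvLowL] at h1; exact h1
    by_cases h2 : c ∈ pvUppL
    · have := (mem_pvUppL c).mp h2
      simp [h1, h2, hl, (isupper_iff c).mpr this]
    · have hu : PySem.Chars.isupper c = false := by
        rw [← Bool.not_eq_true]; rw [isupper_iff]; rw [mem_pvUppL] at h2; exact h2
      by_cases h3 : c ∈ pvDigL
      · have := (mem_pvDigL c).mp h3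
        simp [h1, h2, h3, hl, hu, (isdigit_iff c).mpr this]
      · have hd : PySem.Chars.isdigit c = false := by
          rw [← Bool.not_eq_true]; rw [isdigit_iff]; rw [mem_pvDigL] at h3; exact h3
        simp [h1, h2, h3, hl, hu, hd, PySem.Dict.get?]

-- ===== VERDICT (by name: the statement is the Claim_ definition above) =====
theorem rotationalCipher_spec : Claim_equal_rotationalCipher := by
  intro input r _
  unfold Spec_rotationalCipher rotationalCipher rotationalCipher_alt
  simp only [List.foldl_cons, List.foldl_nil, List.nil_append]
  have hA : ∀ (acc : List Char) (c : Char),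
      (if PySem.Chars.islower c then
        acc ++ [Char.ofNat ((PySem.Int.mod ((c.toNat : Int) - (("abcdefghijklmnopqrstuvwxyz".toList)[0]!.toNat : Int) + r) (("abcdefghijklmnopqrstuvwxyz".toList).length : Int)).toNat + ("abcdefghijklmnopqrstuvwxyz".toList)[0]!.toNat)]
      else if PySem.Chars.isupper c then
        acc ++ [Char.ofNat ((PySem.Int.mod ((c.toNat : Int) - (("ABCDEFGHIJKLMNOPQRSTUVWXYZ".toList)[0]!.toNat : Int) + r) (("ABCDEFGHIJKLMNOPQRSTUVWXYZ".toList).length : Int)).toNat + ("ABCDEFGHIJKLMNOPQRSTUVWXYZ".toList)[0]!.toNat)]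
      else if PySem.Chars.isdigit c then
        acc ++ [Char.ofNat ((PySem.Int.mod ((c.toNat : Int) - (("0123456789".toList)[0]!.toNat : Int) + r) (("0123456789".toList).length : Int)).toNat + ("0123456789".toList)[0]!.toNat)]
      else acc ++ [c])
      = acc ++ [if PySem.Chars.islower c then pvRot 97 26 r c
                else if PySem.Chars.isupper c then pvRot 65 26 r c
                else if PySem.Chars.isdigit c then pvRot 48 10 r c
                else c] := by
    intro acc c
    split_ifs <;> rfl
  simp only [hA, PySem.List.foldl_append_singleton_eq_map, List.nil_append]
  refine congrArg String.ofList ?_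
  refine List.map_congr_left ?_
  intro c _
  have h := char_step r c
  simp only [pvRot, pvLowL, pvUppL, pvDigL] at h
  exact h
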